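-- pv_equiv track=rewrite | github.com/joshbax189/jedi | jedi/refactoring.py | _cleanup_after_insertion
-- ===== SOURCE A (Python) =====
-- def _cleanup_after_insertion(replaced_lines: [str], line_residue: str, line_index, special_cases,
--                              index_end):
--
--     result = []
--     for i, line in enumerate(replaced_lines):
--         # Orig assignment case
--         # Replace with line residue
--         if i == line_index:
--             if line_residue.strip():
--                 result.append(line_residue)
--             else:
--                 continue
--         elif line_index < i and i <= index_end:
--             # drop all parts of a multiline statment
--             continue
--         elif i in special_cases:
--             # TODO what about multiline special cases?
--             if special_cases[i].strip():
--                 result.append(special_cases[i])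
--         else:
--             result.append(line)
--
--     return result
-- ===== SOURCE B (Python) =====
-- def _cleanup_after_insertion(replaced_lines, line_residue, line_index, special_cases,
--                              index_end):
--     # Build a table of per-index cells, mutate it in three sparse passes
--     # (special-case overrides, the residue slot, the dropped range), then flatten.
--     n = len(replaced_lines)
--     cells = [[line] for line in replaced_lines]
--     for k, v in special_cases.items():
--         if 0 <= k < n:
--             cells[k] = [v] if v.strip() else []
--     if 0 <= line_index < n:
--         cells[line_index] = [line_residue] if line_residue.strip() else []
--     for i in range(max(line_index + 1, 0), min(index_end + 1, n)):
--         cells[i] = []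
--     return [s for cell in cells for s in cell]
-- ===== Notes on version B (the rewrite author's own statement) =====
-- stated objective: alternative
-- what changed: B materialises a mutable table of per-index cells and edits it with three sparse update passes (special-case overrides keyed by the dict, one write for the residue slot, one write per dropped index), then flattens; A instead makes one decision pass over the lines testing every index against all conditions. Pre_ only excludes assoc lists whose keys duplicate, which cannot arise from a Python dict.
import Mathlib
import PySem

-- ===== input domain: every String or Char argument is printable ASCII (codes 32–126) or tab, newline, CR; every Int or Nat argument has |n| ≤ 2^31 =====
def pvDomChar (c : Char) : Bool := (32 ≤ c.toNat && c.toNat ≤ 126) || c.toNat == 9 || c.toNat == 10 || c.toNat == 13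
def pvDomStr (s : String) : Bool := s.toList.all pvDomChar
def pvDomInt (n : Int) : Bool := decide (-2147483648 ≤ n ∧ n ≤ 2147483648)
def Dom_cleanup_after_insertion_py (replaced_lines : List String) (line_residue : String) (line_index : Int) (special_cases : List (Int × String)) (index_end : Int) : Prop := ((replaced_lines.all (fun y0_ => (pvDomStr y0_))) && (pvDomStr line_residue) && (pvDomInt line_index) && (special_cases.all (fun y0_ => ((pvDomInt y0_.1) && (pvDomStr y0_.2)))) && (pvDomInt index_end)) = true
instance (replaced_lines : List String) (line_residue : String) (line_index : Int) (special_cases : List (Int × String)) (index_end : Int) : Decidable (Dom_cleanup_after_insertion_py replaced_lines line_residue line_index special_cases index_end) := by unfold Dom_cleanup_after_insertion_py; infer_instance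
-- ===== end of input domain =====

-- B replaces A's one decision pass (every index tested against every condition) by a mutable cell
-- table edited with three sparse update passes and then flattened; same result, different algorithm.

-- ===== PORT A =====
-- literal port of A's enumerate loop; `special_cases[i]` after `i in special_cases` is one Dict.get? match
def cleanup_after_insertion_py (replaced_lines : List String) (line_residue : String) (line_index : Int) (special_cases : List (Int × String)) (index_end : Int) : List String :=
  (PySem.List.enumerate replaced_lines 0).foldl (fun result p =>
    if p.1 = line_index then
      (if PySem.Str.strip line_residue ≠ "" then result ++ [line_residue] else result)
    else if line_index < p.1 ∧ p.1 ≤ index_end then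
      result
    else
      match (PySem.Dict.mk special_cases).get? p.1 with
      | some s => if PySem.Str.strip s ≠ "" then result ++ [s] else result
      | none => result ++ [p.2]) []

-- ===== PORT B =====
-- port of Source B: the cell table; `cells[k] = v` under the `0 <= k < n` guard is exactly List.set k.toNat
-- (hand-ported step for step: Python list assignment at a guarded in-range nonnegative index is exact here);
-- `for k, v in special_cases.items()` iterates the dict's pairs in insertion order = the assoc list itself
def cleanup_after_insertion_py_alt (replaced_lines : List String) (line_residue : String) (line_index : Int) (special_cases : List (Int × String)) (index_end : Int) : List String :=
  let n : Int := replaced_lines.length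
  let cells0 : List (List String) := replaced_lines.map (fun l => [l])
  let cells1 := special_cases.foldl (fun cs kv =>
      if 0 ≤ kv.1 ∧ kv.1 < n then cs.set kv.1.toNat (if PySem.Str.strip kv.2 ≠ "" then [kv.2] else []) else cs) cells0
  let cells2 := if 0 ≤ line_index ∧ line_index < n then cells1.set line_index.toNat (if PySem.Str.strip line_residue ≠ "" then [line_residue] else []) else cells1
  let cells3 := (PySem.List.pyRange (max (line_index + 1) 0) (min (index_end + 1) n) 1).foldl (fun cs i => cs.set i.toNat []) cells2
  cells3.flatMap id

-- ===== PRECONDITION & SPEC =====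
-- Pre_ excludes only assoc lists with a duplicated key: the Python parameter is a dict[int, str], whose
-- assoc-list representation always has distinct keys, so no actual Python input is excluded.
def Pre_cleanup_after_insertion_py (replaced_lines : List String) (line_residue : String) (line_index : Int) (special_cases : List (Int × String)) (index_end : Int) : Prop := (special_cases.map Prod.fst).Nodup
instance (replaced_lines : List String) (line_residue : String) (line_index : Int) (special_cases : List (Int × String)) (index_end : Int) : Decidable (Pre_cleanup_after_insertion_py replaced_lines line_residue line_index special_cases index_end) := by unfold Pre_cleanup_after_insertion_py; infer_instance

def pvWitness_cleanup_after_insertion_py : List String × String × Int × (List (Int × String)) × Int := (["pass", "x = 1"], " y = 2", 1, [(0, "  ")], 1)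

def Spec_cleanup_after_insertion_py (replaced_lines : List String) (line_residue : String) (line_index : Int) (special_cases : List (Int × String)) (index_end : Int) (out : List String) : Prop := out = cleanup_after_insertion_py_alt replaced_lines line_residue line_index special_cases index_end
instance (replaced_lines : List String) (line_residue : String) (line_index : Int) (special_cases : List (Int × String)) (index_end : Int) (out : List String) : Decidable (Spec_cleanup_after_insertion_py replaced_lines line_residue line_index special_cases index_end out) := by unfold Spec_cleanup_after_insertion_py; infer_instance

-- ===== CLAIM (what is proved, stated in full; the proofs are below) =====
def Claim_equal_cleanup_after_insertion_py : Prop := ∀ (replaced_lines : List String) (line_residue : String) (line_index : Int) (special_cases : List (Int × String)) (index_end : Int), Dom_cleanup_after_insertion_py replaced_lines line_residue line_index special_cases index_end → Pre_cleanup_after_insertion_py replaced_lines line_residue line_index special_cases index_end → Spec_cleanup_after_insertion_py replaced_lines line_residue line_index special_cases index_end (cleanup_after_insertion_py replaced_lines line_residue line_index special_cases index_end)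

-- ===== LEMMAS AND PROOFS =====

-- the cell a special-case value contributes
def pvCell (v : String) : List String := if PySem.Str.strip v ≠ "" then [v] else []

-- per-index contribution of A's loop body, as a function of the index alone
def pvF (replaced_lines : List String) (line_residue : String) (line_index : Int) (special_cases : List (Int × String)) (index_end : Int) (i : Int) : List String :=
  if i = line_index then pvCell line_residue
  else if line_index < i ∧ i ≤ index_end then []
  else
    match (PySem.Dict.mk special_cases).get? i with
    | some s => pvCell s
    | none => [PySem.List.pyGetD replaced_lines i ""]

theorem pv_flatMap_congr {α β : Type} (l : List α) (f g : α → List β)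
    (h : ∀ x ∈ l, f x = g x) : l.flatMap f = l.flatMap g := by
  induction l with
  | nil => rfl
  | cons x xs ih =>
      simp only [List.flatMap_cons]
      rw [h x (List.mem_cons_self), ih (fun y hy => h y (List.mem_cons_of_mem _ hy))]

-- per-pair contribution of A's loop body
def pvG (line_residue : String) (line_index : Int) (special_cases : List (Int × String)) (index_end : Int) (p : Int × String) : List String :=
  if p.1 = line_index then pvCell line_residue
  else if line_index < p.1 ∧ p.1 ≤ index_end then []
  else
    match (PySem.Dict.mk special_cases).get? p.1 with
    | some s => pvCell s
    | none => [p.2]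

theorem pv_flatMap_map {α β γ : Type} (l : List α) (f : α → β) (g : β → List γ) :
    (l.map f).flatMap g = l.flatMap (fun x => g (f x)) := by
  induction l with
  | nil => rfl
  | cons x xs ih => simp [ih]

theorem pv_body_step (line_residue : String) (line_index : Int)
    (special_cases : List (Int × String)) (index_end : Int)
    (result : List String) (p : Int × String) :
    (if p.1 = line_index then
      (if PySem.Str.strip line_residue ≠ "" then result ++ [line_residue] else result)
    else if line_index < p.1 ∧ p.1 ≤ index_end then
      result
    else
      match (PySem.Dict.mk special_cases).get? p.1 with
      | some s => if PySem.Str.strip s ≠ "" then result ++ [s] else result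
      | none => result ++ [p.2])
    = result ++ pvG line_residue line_index special_cases index_end p := by
  unfold pvG pvCell
  by_cases h1 : p.1 = line_index
  · simp only [if_pos h1]; split_ifs <;> simp
  · simp only [if_neg h1]
    by_cases h2 : line_index < p.1 ∧ p.1 ≤ index_end
    · simp [h2]
    · simp only [if_neg h2]
      cases hget : (PySem.Dict.mk special_cases).get? p.1 with
      | some s => dsimp only; split_ifs <;> simp
      | none => rfl

theorem pv_foldl_body (line_residue : String) (line_index : Int)
    (special_cases : List (Int × String)) (index_end : Int)
    (l : List (Int × String)) (acc : List String) :
    l.foldl (fun result p =>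
      if p.1 = line_index then
        (if PySem.Str.strip line_residue ≠ "" then result ++ [line_residue] else result)
      else if line_index < p.1 ∧ p.1 ≤ index_end then
        result
      else
        match (PySem.Dict.mk special_cases).get? p.1 with
        | some s => if PySem.Str.strip s ≠ "" then result ++ [s] else result
        | none => result ++ [p.2]) acc
    = acc ++ l.flatMap (pvG line_residue line_index special_cases index_end) := by
  induction l generalizing acc with
  | nil => simp
  | cons x xs ih =>
      rw [List.foldl_cons, pv_body_step, ih, List.flatMap_cons, List.append_assoc]

theorem pvA_flatMap (replaced_lines : List String) (line_residue : String) (line_index : Int) (special_cases : List (Int × String)) (index_end : Int) :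
    cleanup_after_insertion_py replaced_lines line_residue line_index special_cases index_end
      = (PySem.List.pyRange 0 (replaced_lines.length : Int) 1).flatMap
          (pvF replaced_lines line_residue line_index special_cases index_end) := by
  unfold cleanup_after_insertion_py
  rw [pv_foldl_body, PySem.List.enumerate_eq_map_pyRange replaced_lines "", pv_flatMap_map,
      List.nil_append]
  have hlen : PySem.List.len replaced_lines = (replaced_lines.length : Int) := by
    simp [PySem.List.len]
  rw [hlen]
  exact pv_flatMap_congr _ _ _ (fun j _ => rfl)

-- length preserved through any fold whose step preserves length
theorem pv_length_foldl {α : Type} (l : List α) (F : List (List String) → α → List (List String))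
    (h : ∀ cs a, (F cs a).length = cs.length) (cs : List (List String)) :
    (l.foldl F cs).length = cs.length := by
  induction l generalizing cs with
  | nil => rfl
  | cons x xs ih => rw [List.foldl_cons, ih, h]

-- the step of B's special-cases pass
def pvSC (n : Int) (cs : List (List String)) (kv : Int × String) : List (List String) :=
  if 0 ≤ kv.1 ∧ kv.1 < n then cs.set kv.1.toNat (pvCell kv.2) else cs

theorem pv_length_pvSC (n : Int) (cs : List (List String)) (kv : Int × String) :
    (pvSC n cs kv).length = cs.length := by
  unfold pvSC; split_ifs <;> simp

-- indices no pair of l targets are untouched by the special-cases pass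
theorem pv_scfold_untouched (n : Int) (l : List (Int × String)) (cs : List (List String)) (j : Nat)
    (h : ∀ kv ∈ l, kv.1 ≠ (j : Int)) :
    (l.foldl (pvSC n) cs)[j]? = cs[j]? := by
  induction l generalizing cs with
  | nil => rfl
  | cons kv xs ih =>
      rw [List.foldl_cons, ih _ (fun p hp => h p (List.mem_cons_of_mem _ hp))]
      unfold pvSC
      split_ifs with hg
      · have hne : kv.1.toNat ≠ j := by
          have := h kv List.mem_cons_self; omega
        exact List.getElem?_set_ne hne
      · rfl

-- what the special-cases pass leaves at index j: the (unique) pair keyed j, else the old cell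
theorem pv_scfold_get (n : Int) (l : List (Int × String)) (hnd : (l.map Prod.fst).Nodup)
    (cs : List (List String)) (hcs : (cs.length : Int) = n) (j : Nat) (hj : j < cs.length) :
    (l.foldl (pvSC n) cs)[j]? =
      match l.find? (fun kv => kv.1 == (j : Int)) with
      | some kv => some (pvCell kv.2)
      | none => cs[j]? := by
  induction l generalizing cs with
  | nil => rfl
  | cons kv xs ih =>
      rw [List.map_cons, List.nodup_cons] at hnd
      rw [List.foldl_cons, List.find?_cons]
      by_cases hk : kv.1 = (j : Int)
      · have hbeq : (kv.1 == (j : Int)) = true := by simp [hk]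
        rw [hbeq]
        have hg : 0 ≤ kv.1 ∧ kv.1 < n := by omega
        have huntouched : (xs.foldl (pvSC n) (pvSC n cs kv))[j]? = (pvSC n cs kv)[j]? := by
          apply pv_scfold_untouched
          intro p hp hpk
          exact hnd.1 (by rw [← hk, ← hpk] at *; exact List.mem_map_of_mem hp)
        rw [huntouched]
        unfold pvSC
        rw [if_pos hg]
        have : kv.1.toNat = j := by omega
        rw [this]
        exact List.getElem?_set_self hj
      · have hbeq : (kv.1 == (j : Int)) = false := by simp [hk]
        rw [hbeq]
        have hlen : (pvSC n cs kv).length = cs.length := pv_length_pvSC n cs kv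
        rw [ih hnd.2 (pvSC n cs kv) (by rw [hlen]; exact hcs) (by omega)]
        have hcell : (pvSC n cs kv)[j]? = cs[j]? := by
          unfold pvSC
          split_ifs with hg
          · exact List.getElem?_set_ne (by omega)
          · rfl
        cases xs.find? (fun kv => kv.1 == (j : Int)) with
        | some _ => rfl
        | none => exact hcell

-- the dropped-range pass writes [] exactly on [a, b) ∩ [0, length)
theorem pv_dropfold_get_aux (k : Nat) : ∀ (a b : Int), 0 ≤ a → (b - a).toNat ≤ k →
    ∀ (cs : List (List String)) (j : Nat),
    ((PySem.List.pyRange a b 1).foldl (fun cs i => cs.set i.toNat ([] : List String)) cs)[j]? =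
      if a ≤ (j : Int) ∧ (j : Int) < b ∧ j < cs.length then some [] else cs[j]? := by
  induction k with
  | zero =>
      intro a b h0 hk cs j
      rw [PySem.List.pyRange_one_eq_nil (by omega), List.foldl_nil, if_neg (by omega)]
  | succ k ih =>
      intro a b h0 hk cs j
      by_cases hab : b ≤ a
      · rw [PySem.List.pyRange_one_eq_nil hab, List.foldl_nil, if_neg (by omega)]
      · rw [not_le] at hab
        rw [PySem.List.pyRange_one_cons hab, List.foldl_cons]
        rw [ih (a + 1) b (by omega) (by omega) (cs.set a.toNat []) j]
        rw [List.length_set]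
        by_cases hja : (j : Int) = a
        · have hja' : a.toNat = j := by omega
          rw [if_neg (by omega)]
          by_cases hjl : j < cs.length
          · rw [if_pos (by omega), hja', List.getElem?_set_self hjl]
          · rw [if_neg (by omega)]
            have h1 : (cs.set a.toNat [])[j]? = none :=
              List.getElem?_eq_none (by rw [List.length_set]; omega)
            have h2 : cs[j]? = none := List.getElem?_eq_none (by omega)
            rw [h1, h2]
        · rw [List.getElem?_set_ne (by omega)]
          by_cases hc : a + 1 ≤ (j : Int) ∧ (j : Int) < b ∧ j < cs.length
          · rw [if_pos hc, if_pos (by omega)]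
          · rw [if_neg hc, if_neg (by omega)]

theorem pv_dropfold_get (a b : Int) (h0 : 0 ≤ a) (cs : List (List String)) (j : Nat) :
    ((PySem.List.pyRange a b 1).foldl (fun cs i => cs.set i.toNat ([] : List String)) cs)[j]? =
      if a ≤ (j : Int) ∧ (j : Int) < b ∧ j < cs.length then some [] else cs[j]? :=
  pv_dropfold_get_aux (b - a).toNat a b h0 le_rfl cs j

-- B with its let-chain written out (definitional)
theorem pvB_eq (replaced_lines : List String) (line_residue : String) (line_index : Int)
    (special_cases : List (Int × String)) (index_end : Int) :
    cleanup_after_insertion_py_alt replaced_lines line_residue line_index special_cases index_end =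
      ((PySem.List.pyRange (max (line_index + 1) 0) (min (index_end + 1) (replaced_lines.length : Int)) 1).foldl
        (fun cs i => cs.set i.toNat [])
        (if 0 ≤ line_index ∧ line_index < (replaced_lines.length : Int)
         then (special_cases.foldl (pvSC (replaced_lines.length : Int)) (replaced_lines.map (fun l => [l]))).set
                line_index.toNat (pvCell line_residue)
         else special_cases.foldl (pvSC (replaced_lines.length : Int)) (replaced_lines.map (fun l => [l])))).flatMap id := rfl

-- ===== VERDICT (by name: the statement is the Claim_ definition above) =====
theorem cleanup_after_insertion_py_spec : Claim_equal_cleanup_after_insertion_py := by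
  unfold Claim_equal_cleanup_after_insertion_py
  intro replaced_lines line_residue line_index special_cases index_end _ hnd
  unfold Pre_cleanup_after_insertion_py at hnd
  unfold Spec_cleanup_after_insertion_py
  rw [pvA_flatMap, pvB_eq]
  set n : Int := (replaced_lines.length : Int) with hn
  set cells0 : List (List String) := replaced_lines.map (fun l => [l]) with hc0
  set cells1 := special_cases.foldl (pvSC n) cells0 with hc1
  set cells2 := if 0 ≤ line_index ∧ line_index < n then cells1.set line_index.toNat (pvCell line_residue) else cells1 with hc2
  set cells3 := (PySem.List.pyRange (max (line_index + 1) 0) (min (index_end + 1) n) 1).foldl (fun cs i => cs.set i.toNat []) cells2 with hc3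
  have hl0 : cells0.length = replaced_lines.length := by simp [hc0]
  have hl1 : cells1.length = replaced_lines.length := by
    rw [hc1, pv_length_foldl _ _ (pv_length_pvSC n), hl0]
  have hl2 : cells2.length = replaced_lines.length := by
    rw [hc2]; split_ifs <;> simp [hl1]
  have hl3 : cells3.length = replaced_lines.length := by
    rw [hc3, pv_length_foldl _ _ (fun cs i => List.length_set), hl2]
  have hmain : cells3 = (PySem.List.pyRange 0 n 1).map
      (pvF replaced_lines line_residue line_index special_cases index_end) := by
    apply List.ext_getElem?
    intro j
    by_cases hj : j < replaced_lines.length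
    · have hdrop := pv_dropfold_get (max (line_index + 1) 0) (min (index_end + 1) n) (by omega) cells2 j
      rw [← hc3] at hdrop
      have hrhs : ((PySem.List.pyRange 0 n 1).map
          (pvF replaced_lines line_residue line_index special_cases index_end))[j]? =
          some (pvF replaced_lines line_residue line_index special_cases index_end (j : Int)) := by
        rw [List.getElem?_map, PySem.List.getElem?_pyRange_one]
        rw [if_pos (by rw [hn]; omega)]
        simp
      rw [hrhs, hdrop]
      by_cases hd : max (line_index + 1) 0 ≤ (j : Int) ∧ (j : Int) < min (index_end + 1) n ∧ j < cells2.length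
      · rw [if_pos hd]
        unfold pvF
        rw [if_neg (by omega), if_pos (by omega)]
      · rw [if_neg hd]
        have hnotdrop : ¬ (line_index < (j : Int) ∧ (j : Int) ≤ index_end) := by
          intro hcon
          exact hd ⟨by omega, by omega, by omega⟩
        by_cases hli : (j : Int) = line_index
        · have hg : 0 ≤ line_index ∧ line_index < n := by rw [hn]; omega
          rw [hc2, if_pos hg]
          have : line_index.toNat = j := by omega
          rw [this, List.getElem?_set_self (by omega)]
          unfold pvF
          rw [if_pos hli]
        · have hc2j : cells2[j]? = cells1[j]? := by
            rw [hc2]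
            split_ifs with hg
            · exact List.getElem?_set_ne (by omega)
            · rfl
          rw [hc2j, hc1, pv_scfold_get n special_cases hnd cells0 (by rw [hl0, hn]) j (by omega)]
          unfold pvF
          rw [if_neg hli, if_neg hnotdrop]
          have hget : (PySem.Dict.mk special_cases).get? (j : Int) =
              (special_cases.find? (fun kv => kv.1 == (j : Int))).map Prod.snd := rfl
          rw [hget]
          cases special_cases.find? (fun kv => kv.1 == (j : Int)) with
          | some kv =>
              simp only [Option.map_some]
          | none =>
              simp only [Option.map_none]
              rw [hc0, List.getElem?_map]
              rw [PySem.List.pyGetD_natCast _ _ _]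
              rw [List.getElem?_eq_getElem hj]
              simp [List.getD, hj]
    · have h1 : cells3[j]? = none := by
        rw [List.getElem?_eq_none]; omega
      have h2 : ((PySem.List.pyRange 0 n 1).map
          (pvF replaced_lines line_residue line_index special_cases index_end))[j]? = none := by
        rw [List.getElem?_eq_none]
        rw [List.length_map, PySem.List.length_pyRange_one]
        omega
      rw [h1, h2]
  rw [hmain, pv_flatMap_map]
  exact pv_flatMap_congr _ _ _ (fun x _ => rfl)
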